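-- pv_equiv track=rewrite | github.com/SolomonMg/TT_TogetherAI_SFT | parse.py | _last_balanced_json_anywhere
-- ===== SOURCE A (Python) =====
-- def _last_balanced_json_anywhere(s: str):
--     last = None
--     n = len(s)
--     i = 0
--     while i < n:
--         i = s.find('{', i)
--         if i == -1: break
--         depth = 0
--         in_str = False
--         esc = False
--         j = i
--         while j < n:
--             ch = s[j]
--             if in_str:
--                 if esc:
--                     esc = False
--                 elif ch == '\\':
--                     esc = True
--                 elif ch == '"':
--                     in_str = False
--             else:
--                 if ch == '"':
--                     in_str = True
--                 elif ch == '{':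
--                     depth += 1
--                 elif ch == '}':
--                     depth -= 1
--                     if depth == 0:
--                         cand = s[i:j+1]
--                         last = cand
--                         i = j + 1
--                         break
--             j += 1
--         else:
--             break
--     return last
-- ===== SOURCE B (Python) =====
-- def _last_balanced_json_anywhere(s: str):
--     last = None
--     n = len(s)
--     depth = 0
--     in_str = False
--     esc = False
--     start = 0
--     i = 0
--     while i < n:
--         ch = s[i]
--         if depth == 0:
--             if ch == '{':
--                 start = i
--                 depth = 1
--                 in_str = False
--                 esc = False
--         elif in_str:
--             if esc:
--                 esc = False
--             elif ch == '\\':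
--                 esc = True
--             elif ch == '"':
--                 in_str = False
--         else:
--             if ch == '"':
--                 in_str = True
--             elif ch == '{':
--                 depth += 1
--             elif ch == '}':
--                 depth -= 1
--                 if depth == 0:
--                     last = s[start:i+1]
--         i += 1
--     return last
-- ===== Notes on version B (the rewrite author's own statement) =====
-- stated objective: simpler
-- what changed: A's nested loops (repeated find-the-next-open-brace restarts plus an inner rescanning while-loop) are replaced by one flat forward pass over the string that keeps depth/in-string/escape state and a start index, recording the candidate each time depth returns to 0.
import Mathlib
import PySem

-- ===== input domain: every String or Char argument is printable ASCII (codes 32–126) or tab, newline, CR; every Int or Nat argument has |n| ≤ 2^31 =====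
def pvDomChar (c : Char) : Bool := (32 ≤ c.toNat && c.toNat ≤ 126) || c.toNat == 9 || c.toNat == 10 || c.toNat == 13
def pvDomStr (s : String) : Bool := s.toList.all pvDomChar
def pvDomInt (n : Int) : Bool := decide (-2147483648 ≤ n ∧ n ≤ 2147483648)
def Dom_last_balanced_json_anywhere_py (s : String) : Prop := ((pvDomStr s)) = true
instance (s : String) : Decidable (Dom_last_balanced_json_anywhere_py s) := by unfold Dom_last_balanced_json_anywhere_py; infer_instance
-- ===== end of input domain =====

-- B replaces A's nested restart-from-find loops by ONE flat forward pass with a depth/in-string/escape state machine (objective: simpler).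

-- shared helper: Python's s[a:b] for Nat indices (exact for 0 ≤ a ≤ b: drop/take clamps past the end exactly as Python's slice does)
def pvSliceStr (cs : List Char) (a b : Nat) : String := String.ofList ((cs.drop a).take (b - a))

-- ===== PORT A =====
-- the brace search s.find: `rest` is the not-yet-searched suffix s[i:], `i` its absolute index (some index; none = -1)
def pvFindBrace (rest : List Char) (i : Nat) : Option Nat :=
  match rest with
  | [] => none
  | c :: rest' => if c = '{' then some i else pvFindBrace rest' (i + 1)

-- A's inner `while j < n` scan over the suffix `rest` = s[j:]; returns the absolute index j where
-- depth returns to 0 (none = ran off the end, Python's while-else)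
def pvAInner (rest : List Char) (j : Nat) (d : Int) (instr esc : Bool) : Option Nat :=
  match rest with
  | [] => none
  | ch :: rest' =>
    if instr then
      if esc then pvAInner rest' (j + 1) d instr false
      else if ch = '\\' then pvAInner rest' (j + 1) d instr true
      else if ch = '"' then pvAInner rest' (j + 1) d false esc
      else pvAInner rest' (j + 1) d instr esc
    else
      if ch = '"' then pvAInner rest' (j + 1) d true esc
      else if ch = '{' then pvAInner rest' (j + 1) (d + 1) instr esc
      else if ch = '}' then
        if d - 1 = 0 then some j else pvAInner rest' (j + 1) (d - 1) instr esc
      else pvAInner rest' (j + 1) d instr esc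

-- A's outer `while i < n` loop; `fuel` only bounds the number of iterations (each iteration moves i
-- strictly forward, so `n + 1` iterations can never be reached — the guard is never the result)
def pvAOuter (cs : List Char) (fuel : Nat) (i : Nat) (last : Option String) : Option String :=
  match fuel with
  | 0 => last
  | fuel + 1 =>
    match pvFindBrace (cs.drop i) i with
    | none => last
    | some k =>
      match pvAInner (cs.drop k) k 0 false false with
      | none => last
      | some jc => pvAOuter cs fuel (jc + 1) (some (pvSliceStr cs k (jc + 1)))

def last_balanced_json_anywhere_py (s : String) : Option String :=
  pvAOuter s.toList (s.toList.length + 1) 0 none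

-- ===== PORT B =====
-- the single flat `while i < n` pass of Source B; `rest` is the unread suffix s[i:], `i` its absolute index
def pvBLoop (cs : List Char) (rest : List Char) (i : Nat) (depth : Int) (instr esc : Bool)
    (start : Nat) (last : Option String) : Option String :=
  match rest with
  | [] => last
  | ch :: rest' =>
    if depth = 0 then
      if ch = '{' then pvBLoop cs rest' (i + 1) 1 false false i last
      else pvBLoop cs rest' (i + 1) depth instr esc start last
    else if instr then
      if esc then pvBLoop cs rest' (i + 1) depth instr false start last
      else if ch = '\\' then pvBLoop cs rest' (i + 1) depth instr true start last
      else if ch = '"' then pvBLoop cs rest' (i + 1) depth false esc start last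
      else pvBLoop cs rest' (i + 1) depth instr esc start last
    else
      if ch = '"' then pvBLoop cs rest' (i + 1) depth true esc start last
      else if ch = '{' then pvBLoop cs rest' (i + 1) (depth + 1) instr esc start last
      else if ch = '}' then
        if depth - 1 = 0 then
          pvBLoop cs rest' (i + 1) 0 instr esc start (some (pvSliceStr cs start (i + 1)))
        else pvBLoop cs rest' (i + 1) (depth - 1) instr esc start last
      else pvBLoop cs rest' (i + 1) depth instr esc start last

def last_balanced_json_anywhere_py_alt (s : String) : Option String :=
  pvBLoop s.toList s.toList 0 0 false false 0 none

-- ===== PRECONDITION & SPEC =====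
def Spec_last_balanced_json_anywhere_py (s : String) (out : Option String) : Prop := out = last_balanced_json_anywhere_py_alt s
instance (s : String) (out : Option String) : Decidable (Spec_last_balanced_json_anywhere_py s out) := by unfold Spec_last_balanced_json_anywhere_py; infer_instance

-- ===== CLAIM (what is proved, stated in full; the proofs are below) =====
def Claim_equal_last_balanced_json_anywhere_py : Prop := ∀ (s : String), Dom_last_balanced_json_anywhere_py s → Spec_last_balanced_json_anywhere_py s (last_balanced_json_anywhere_py s)

-- ===== LEMMAS AND PROOFS =====

-- a successful inner scan ends at an index inside the scanned suffix
theorem pvAInner_ge : ∀ (rest : List Char) (j : Nat) (d : Int) (instr esc : Bool) (jc : Nat),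
    pvAInner rest j d instr esc = some jc → j ≤ jc ∧ jc < j + rest.length := by
  intro rest
  induction rest with
  | nil => intro j d instr esc jc h; simp [pvAInner] at h
  | cons ch rest' ih =>
    intro j d instr esc jc h
    rw [pvAInner] at h
    simp only [List.length_cons]
    cases instr with
    | true =>
      cases esc with
      | true => have := ih (j+1) d true false jc (by simpa using h); omega
      | false =>
        by_cases h1 : ch = '\\'
        · have := ih (j+1) d true true jc (by simpa [h1] using h); omega
        · by_cases h2 : ch = '"'
          · have := ih (j+1) d false false jc (by simpa [h1, h2] using h); omega
          · have := ih (j+1) d true false jc (by simpa [h1, h2] using h); omega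
    | false =>
      by_cases h1 : ch = '"'
      · have := ih (j+1) d true esc jc (by simpa [h1] using h); omega
      · by_cases h2 : ch = '{'
        · have := ih (j+1) (d+1) false esc jc (by simpa [h1, h2] using h); omega
        · by_cases h3 : ch = '}'
          · by_cases h4 : d - 1 = 0
            · simp [h1, h2, h3, h4] at h; omega
            · have := ih (j+1) (d-1) false esc jc (by simpa [h1, h2, h3, h4] using h); omega
          · have := ih (j+1) d false esc jc (by simpa [h1, h2, h3] using h); omega

-- While scanning an object (depth ≥ 1), B's flat loop does exactly what A's inner scan does,
-- then resumes at depth 0 just past the closing brace with the candidate recorded.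
theorem pvBLoop_scan (cs : List Char) :
    ∀ (rest : List Char) (j : Nat) (d : Int) (instr esc : Bool) (start : Nat) (last : Option String),
    1 ≤ d → (instr = false → esc = false) →
    pvBLoop cs rest j d instr esc start last =
      match pvAInner rest j d instr esc with
      | none => last
      | some jc =>
          pvBLoop cs (rest.drop (jc + 1 - j)) (jc + 1) 0 false false start
            (some (pvSliceStr cs start (jc + 1))) := by
  intro rest
  induction rest with
  | nil => intro j d instr esc start last hd hinv; rw [pvBLoop, pvAInner]
  | cons ch rest' ih =>
    intro j d instr esc start last hd hinv
    have hd0 : ¬ d = 0 := by omega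
    rw [pvBLoop, pvAInner]
    simp only [hd0, if_false]
    cases instr with
    | true =>
      cases esc with
      | true =>
        simp only [if_true]
        rw [ih (j+1) d true false start last hd (by simp)]
        cases hsc : pvAInner rest' (j+1) d true false with
        | none => rfl
        | some jc =>
          have hge := pvAInner_ge rest' (j+1) d true false jc hsc
          simp only
          have e1 : jc + 1 - j = (jc - j) + 1 := by omega
          have e2 : jc + 1 - (j + 1) = jc - j := by omega
          rw [e1, e2, List.drop_succ_cons]
      | false =>
        by_cases h1 : ch = '\\'
        · simp [h1]
          rw [ih (j+1) d true true start last hd (by simp)]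
          cases hsc : pvAInner rest' (j+1) d true true with
          | none => rfl
          | some jc =>
            have hge := pvAInner_ge rest' (j+1) d true true jc hsc
            simp only
            have e1 : jc + 1 - j = (jc - j) + 1 := by omega
            have e2 : jc + 1 - (j + 1) = jc - j := by omega
            rw [e1, e2, List.drop_succ_cons]
        · by_cases h2 : ch = '"'
          · simp [h1, h2]
            rw [ih (j+1) d false false start last hd (by simp)]
            cases hsc : pvAInner rest' (j+1) d false false with
            | none => rfl
            | some jc =>
              have hge := pvAInner_ge rest' (j+1) d false false jc hsc
              simp only
              have e1 : jc + 1 - j = (jc - j) + 1 := by omega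
              have e2 : jc + 1 - (j + 1) = jc - j := by omega
              rw [e1, e2, List.drop_succ_cons]
          · simp [h1, h2]
            rw [ih (j+1) d true false start last hd (by simp)]
            cases hsc : pvAInner rest' (j+1) d true false with
            | none => rfl
            | some jc =>
              have hge := pvAInner_ge rest' (j+1) d true false jc hsc
              simp only
              have e1 : jc + 1 - j = (jc - j) + 1 := by omega
              have e2 : jc + 1 - (j + 1) = jc - j := by omega
              rw [e1, e2, List.drop_succ_cons]
    | false =>
      have hesc : esc = false := hinv rfl
      subst hesc
      simp only [Bool.false_eq_true, if_false]
      by_cases h1 : ch = '"'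
      · simp [h1]
        rw [ih (j+1) d true false start last hd (by simp)]
        cases hsc : pvAInner rest' (j+1) d true false with
        | none => rfl
        | some jc =>
          have hge := pvAInner_ge rest' (j+1) d true false jc hsc
          simp only
          have e1 : jc + 1 - j = (jc - j) + 1 := by omega
          have e2 : jc + 1 - (j + 1) = jc - j := by omega
          rw [e1, e2, List.drop_succ_cons]
      · by_cases h2 : ch = '{'
        · simp [h1, h2]
          rw [ih (j+1) (d+1) false false start last (by omega) (by simp)]
          cases hsc : pvAInner rest' (j+1) (d+1) false false with
          | none => rfl
          | some jc =>
            have hge := pvAInner_ge rest' (j+1) (d+1) false false jc hsc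
            simp only
            have e1 : jc + 1 - j = (jc - j) + 1 := by omega
            have e2 : jc + 1 - (j + 1) = jc - j := by omega
            rw [e1, e2, List.drop_succ_cons]
        · by_cases h3 : ch = '}'
          · by_cases h4 : d - 1 = 0
            · simp [h1, h2, h3, h4]
            · simp [h1, h2, h3, h4]
              rw [ih (j+1) (d-1) false false start last (by omega) (by simp)]
              cases hsc : pvAInner rest' (j+1) (d-1) false false with
              | none => rfl
              | some jc =>
                have hge := pvAInner_ge rest' (j+1) (d-1) false false jc hsc
                simp only
                have e1 : jc + 1 - j = (jc - j) + 1 := by omega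
                have e2 : jc + 1 - (j + 1) = jc - j := by omega
                rw [e1, e2, List.drop_succ_cons]
          · simp [h1, h2, h3]
            rw [ih (j+1) d false false start last hd (by simp)]
            cases hsc : pvAInner rest' (j+1) d false false with
            | none => rfl
            | some jc =>
              have hge := pvAInner_ge rest' (j+1) d false false jc hsc
              simp only
              have e1 : jc + 1 - j = (jc - j) + 1 := by omega
              have e2 : jc + 1 - (j + 1) = jc - j := by omega
              rw [e1, e2, List.drop_succ_cons]

-- At depth 0 B's flat pass coincides with A's outer find-and-rescan loop (any sufficient fuel).
theorem pvBLoop_zero (cs : List Char) (m : Nat) :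
    ∀ (i start : Nat) (last : Option String) (fuel : Nat),
    cs.length - i ≤ m → cs.length - i < fuel →
    pvBLoop cs (cs.drop i) i 0 false false start last = pvAOuter cs fuel i last := by
  induction m with
  | zero =>
    intro i start last fuel hm hfu
    have hi : cs.length ≤ i := by omega
    have hnil : cs.drop i = [] := List.drop_eq_nil_of_le hi
    cases fuel with
    | zero => omega
    | succ f => rw [hnil, pvBLoop, pvAOuter, hnil, pvFindBrace]
  | succ m ih =>
    intro i start last fuel hm hfu
    by_cases hi : i < cs.length
    · have hd : cs.drop i = cs[i] :: cs.drop (i + 1) := List.drop_eq_getElem_cons hi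
      cases fuel with
      | zero => omega
      | succ f =>
        by_cases hb : cs[i] = '{'
        · -- enter an object
          rw [hd, pvBLoop]
          simp only [hb, if_pos, if_true]
          rw [pvBLoop_scan cs (cs.drop (i+1)) (i+1) 1 false false i last (by omega) (by simp)]
          have hfb : pvFindBrace (cs.drop i) i = some i := by rw [hd, pvFindBrace]; simp [hb]
          have hin : pvAInner (cs.drop i) i 0 false false = pvAInner (cs.drop (i+1)) (i+1) 1 false false := by
            rw [hd, pvAInner]; simp [hb]
          rw [pvAOuter, hfb]
          simp only [hin]
          cases hsc : pvAInner (cs.drop (i+1)) (i+1) 1 false false with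
          | none => rfl
          | some jc =>
            have hge := pvAInner_ge (cs.drop (i+1)) (i+1) 1 false false jc hsc
            have hlen : (cs.drop (i+1)).length = cs.length - (i+1) := List.length_drop ..
            simp only
            have e1 : (cs.drop (i+1)).drop (jc + 1 - (i+1)) = cs.drop (jc + 1) := by
              rw [List.drop_drop]; congr 1; omega
            rw [e1]
            exact ih (jc + 1) i (some (pvSliceStr cs i (jc + 1))) f (by omega) (by omega)
        · -- skip a character that does not open an object
          rw [hd, pvBLoop]
          simp only [if_pos, hb, if_false]
          rw [ih (i+1) start last (f+1) (by omega) (by omega)]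
          have hstep : pvFindBrace (cs.drop i) i = pvFindBrace (cs.drop (i+1)) (i+1) := by
            rw [hd, pvFindBrace]; simp [hb]
          rw [pvAOuter]
          conv_rhs => rw [pvAOuter]
          rw [← hstep]
    · have hnil : cs.drop i = [] := List.drop_eq_nil_of_le (by omega)
      cases fuel with
      | zero => omega
      | succ f => rw [hnil, pvBLoop, pvAOuter, hnil, pvFindBrace]

-- ===== VERDICT (by name: the statement is the Claim_ definition above) =====
theorem last_balanced_json_anywhere_py_spec : Claim_equal_last_balanced_json_anywhere_py := by
  intro s _
  unfold Spec_last_balanced_json_anywhere_py last_balanced_json_anywhere_py last_balanced_json_anywhere_py_alt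
  have := pvBLoop_zero s.toList s.toList.length 0 0 none (s.toList.length + 1) (by omega) (by omega)
  simpa using this.symm
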